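-- pv_equiv track=rewrite | github.com/mfbx9da4/mfbx9da4.github.io | algorithms/codeforces/traveling_salesman_around_lake/main.py | solve
-- ===== SOURCE A (Python) =====
-- def solve(array, dist):
--     total = 0
--     biggest = 0
--     for i, x in enumerate(array):
--         if i == len(array) - 1:
--             next_pos = dist + array[0]
--         else:
--             next_pos = array[i + 1]
--         d = next_pos - array[i]
--         if d > biggest:
--             biggest = d
--         total += d
--     return total - biggest
-- ===== SOURCE B (Python) =====
-- def solve(array, dist):
--     if not array:
--         return 0
--
--     def mg(xs):
--         # divide and conquer: (first, last, largest adjacent gap or None)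
--         if len(xs) == 1:
--             return xs[0], xs[0], None
--         mid = len(xs) // 2
--         f1, l1, g1 = mg(xs[:mid])
--         f2, l2, g2 = mg(xs[mid:])
--         g = f2 - l1
--         if g1 is not None and g1 > g:
--             g = g1
--         if g2 is not None and g2 > g:
--             g = g2
--         return f1, l2, g
--
--     f, l, g = mg(array)
--     best = max(0, dist + f - l)
--     if g is not None and g > best:
--         best = g
--     return dist - best
-- ===== Notes on version B (the rewrite author's own statement) =====
-- stated objective: alternative
-- what changed: B replaces A's single-pass index loop with two running accumulators by a divide-and-conquer recursion that splits the position list in half, combines (first, last, largest-adjacent-gap) summaries, and uses the closed form that the gaps telescope to dist, so no total is accumulated at all.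
import Mathlib
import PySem

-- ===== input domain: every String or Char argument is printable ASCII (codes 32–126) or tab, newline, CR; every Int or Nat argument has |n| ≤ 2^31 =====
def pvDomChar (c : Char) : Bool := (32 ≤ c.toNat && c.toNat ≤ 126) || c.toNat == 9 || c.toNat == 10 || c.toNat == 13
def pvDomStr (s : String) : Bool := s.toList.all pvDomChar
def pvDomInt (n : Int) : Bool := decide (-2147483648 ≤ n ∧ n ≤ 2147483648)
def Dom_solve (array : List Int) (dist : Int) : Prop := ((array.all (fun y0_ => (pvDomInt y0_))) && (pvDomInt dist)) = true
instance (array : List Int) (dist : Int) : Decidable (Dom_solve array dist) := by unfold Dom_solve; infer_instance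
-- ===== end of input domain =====

-- B replaces A's single-pass accumulator loop by a divide-and-conquer (first, last, max-gap) recursion
-- using that the circular gaps telescope to dist (alternative decomposition, same result).
-- ===== PORT A =====
def solve (array : List Int) (dist : Int) : Int :=
  let p := (PySem.List.enumerate array 0).foldl (fun (s : Int × Int) ix =>
    let next_pos := if ix.1 = (array.length : Int) - 1
      then dist + PySem.List.pyGetD array 0 0
      else PySem.List.pyGetD array (ix.1 + 1) 0
    let d := next_pos - PySem.List.pyGetD array ix.1 0
    (s.1 + d, if d > s.2 then d else s.2)) (0, 0)
  p.1 - p.2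

-- ===== PORT B =====
-- Source B's inner mg: divide and conquer, returns (first, last, largest adjacent gap or None).
-- Python only calls mg on nonempty lists; the [] branch is a totality guard only.
def mgB : List Int → Int × Int × Option Int
  | [] => (0, 0, none)
  | [x] => (x, x, none)
  | a :: b :: t =>
      let xs := a :: b :: t
      let mid := xs.length / 2
      let p := mgB (xs.take mid)
      let q := mgB (xs.drop mid)
      let g0 : Int := q.1 - p.2.1
      let g1 : Int := match p.2.2 with | some g1 => if g1 > g0 then g1 else g0 | none => g0
      let g2 : Int := match q.2.2 with | some g2 => if g2 > g1 then g2 else g1 | none => g1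
      (p.1, q.2.1, some g2)
  termination_by xs => xs.length
  decreasing_by
    · simp only [List.length_take, List.length_cons]; omega
    · simp only [List.length_drop, List.length_cons]; omega

def solve_alt (array : List Int) (dist : Int) : Int :=
  match array with
  | [] => 0
  | a :: rest =>
    let r := mgB (a :: rest)
    let best := max 0 (dist + r.1 - r.2.1)
    let best := match r.2.2 with
      | some g => if g > best then g else best
      | none => best
    dist - best

-- ===== PRECONDITION & SPEC =====
def Spec_solve (array : List Int) (dist : Int) (out : Int) : Prop := out = solve_alt array dist
instance (array : List Int) (dist : Int) (out : Int) : Decidable (Spec_solve array dist out) := by unfold Spec_solve; infer_instance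

-- ===== CLAIM (what is proved, stated in full; the proofs are below) =====
def Claim_equal_solve : Prop := ∀ (array : List Int) (dist : Int), Dom_solve array dist → Spec_solve array dist (solve array dist)

-- ===== LEMMAS AND PROOFS =====

-- adjacent gaps of a list
def adjGaps : List Int → List Int
  | x :: y :: t => (y - x) :: adjGaps (y :: t)
  | _ => []

-- max of a list as an Option, via foldl max
def omax : List Int → Option Int
  | [] => none
  | x :: t => some (t.foldl max x)

def maxWith (b : Int) : Option Int → Int
  | some g => if g > b then g else b
  | none => b

theorem foldl_max_comm (l : List Int) (x y : Int) :
    l.foldl max (max x y) = max x (l.foldl max y) := by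
  induction l generalizing y with
  | nil => rfl
  | cons z zs ih => simp only [List.foldl_cons, max_assoc, ih]

theorem foldl_gaps (L : List Int) (t b : Int) :
    L.foldl (fun (s : Int × Int) d => (s.1 + d, if d > s.2 then d else s.2)) (t, b)
      = (t + L.sum, L.foldl max b) := by
  induction L generalizing t b with
  | nil => simp
  | cons x xs ih =>
    simp only [List.foldl_cons, ih, List.sum_cons]
    have h1 : t + x + xs.sum = t + (x + xs.sum) := by ring
    have h2 : (if x > b then x else b) = max b x := by
      by_cases h : x > b <;> simp [h, max_def] <;> omega
    rw [h1, h2]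

-- A's d-values, as a list, are the adjacent gaps followed by the wrap-around gap
theorem map_dval_eq_gaps (a : Int) (rest : List Int) (dist : Int) :
    (PySem.List.enumerate (a :: rest) 0).map (fun ix : Int × Int =>
        (if ix.1 = ((a :: rest).length : Int) - 1
          then dist + PySem.List.pyGetD (a :: rest) 0 0
          else PySem.List.pyGetD (a :: rest) (ix.1 + 1) 0)
          - PySem.List.pyGetD (a :: rest) ix.1 0)
      = ((a :: rest).zip (rest ++ [dist + a])).map (fun p : Int × Int => p.2 - p.1) := by
  apply List.ext_getElem
  · simp [PySem.List.length_enumerate]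
  · intro k h1 h2
    have hk : k < (a :: rest).length := by
      simpa [PySem.List.length_enumerate] using h1
    have hkz : k < ((a :: rest).zip (rest ++ [dist + a])).length := by simpa using h2
    rw [List.getElem_map, List.getElem_map, PySem.List.getElem_enumerate]
    have hz : ((a :: rest).zip (rest ++ [dist + a]))[k] = ((a :: rest)[k], (rest ++ [dist + a])[k]'(by simp; simpa using hk)) := by
      simp [List.getElem_zip]
    rw [hz]
    simp only [zero_add]
    have hgk : PySem.List.pyGetD (a :: rest) (k : Int) 0 = (a :: rest)[k] := by
      rw [PySem.List.pyGetD_natCast]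
      exact List.getD_eq_getElem _ _ hk
    by_cases hlast : k = rest.length
    · have : ((k : Int) = ((a :: rest).length : Int) - 1) := by simp [hlast]
      rw [if_pos this, hgk]
      have h0 : PySem.List.pyGetD (a :: rest) 0 0 = a := PySem.List.pyGetD_zero_cons a rest 0
      have hnxt : (rest ++ [dist + a])[k]'(by simp; simpa using hk) = dist + a := by
        subst hlast; simp
      rw [h0, hnxt]
    · have hklt : k < rest.length := by simp at hk; omega
      have hne : ¬ ((k : Int) = ((a :: rest).length : Int) - 1) := by
        simp only [List.length_cons]; push_cast; omega
      rw [if_neg hne, hgk]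
      have hsucc : PySem.List.pyGetD (a :: rest) ((k : Int) + 1) 0 = (a :: rest)[k + 1]'(by simp; omega) := by
        have : ((k : Int) + 1) = ((k + 1 : Nat) : Int) := by push_cast; ring
        rw [this, PySem.List.pyGetD_natCast]
        exact List.getD_eq_getElem _ _ (by simp; omega)
      have hnxt : (rest ++ [dist + a])[k]'(by simp; simpa using hk) = rest[k]'hklt := by
        rw [List.getElem_append_left hklt]
      rw [hsucc, hnxt]
      simp [List.getElem_cons_succ]

-- the zip form of the gap list equals adjGaps plus the wrap gap
theorem zip_eq_adj (a z : Int) (rest : List Int) :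
    ((a :: rest).zip (rest ++ [z])).map (fun p : Int × Int => p.2 - p.1)
      = adjGaps (a :: rest) ++ [z - (a :: rest).getLastD 0] := by
  induction rest generalizing a with
  | nil => simp [adjGaps]
  | cons b t ih => simp [adjGaps, ih b]

theorem adjGaps_sum (a : Int) (t : List Int) :
    (adjGaps (a :: t)).sum = (a :: t).getLastD 0 - a := by
  induction t generalizing a with
  | nil => simp [adjGaps]
  | cons b s ih => simp [adjGaps, ih b]

theorem adjGaps_append (l1 l2 : List Int) (h1 : l1 ≠ []) (h2 : l2 ≠ []) :
    adjGaps (l1 ++ l2) = adjGaps l1 ++ (l2.headD 0 - l1.getLastD 0) :: adjGaps l2 := by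
  induction l1 with
  | nil => exact absurd rfl h1
  | cons c t ih =>
    cases t with
    | nil =>
      cases l2 with
      | nil => exact absurd rfl h2
      | cons d s => simp [adjGaps]
    | cons c' t' =>
      have : (c :: c' :: t') ++ l2 = c :: ((c' :: t') ++ l2) := by simp
      rw [this]
      have hcons : ((c' :: t') ++ l2) = c' :: (t' ++ l2) := by simp
      rw [show adjGaps (c :: (c' :: t' ++ l2)) = (c' - c) :: adjGaps (c' :: (t' ++ l2)) from rfl]
      rw [show (c' :: (t' ++ l2)) = ((c' :: t') ++ l2) from by simp]
      rw [ih (by simp)]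
      simp [adjGaps]

theorem omax_append (A : List Int) (b : Int) (B : List Int) :
    omax (A ++ b :: B) = some (maxWith (maxWith b (omax A)) (omax B)) := by
  cases A with
  | nil =>
    cases B with
    | nil => simp [omax, maxWith]
    | cons y s =>
      simp only [List.nil_append, omax, maxWith, List.foldl_cons]
      congr 1
      rw [show max b y = max b y from rfl]
      have := foldl_max_comm s b y
      rw [this]
      rw [max_def]; split_ifs <;> omega
  | cons x t =>
    simp only [List.cons_append, omax, List.foldl_append, List.foldl_cons]
    congr 1
    set mA := t.foldl max x with hmA
    have hW : maxWith b (some mA) = max mA b := by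
      simp [maxWith, max_def]; split_ifs <;> omega
    rw [hW]
    cases B with
    | nil => simp [maxWith]
    | cons y s =>
      simp only [List.foldl_cons, maxWith]
      have := foldl_max_comm s (max mA b) y
      rw [this]
      rw [max_def, max_def]
      split_ifs <;> omega

-- correctness of the divide-and-conquer summary
theorem mgB_spec (xs : List Int) :
    xs ≠ [] → mgB xs = (xs.headD 0, xs.getLastD 0, omax (adjGaps xs)) := by
  induction xs using mgB.induct with
  | case1 => intro h; exact absurd rfl h
  | case2 x => intro _; simp [mgB, adjGaps, omax]
  | case3 a b t _xs _mid ih1 ih2 =>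
    intro _
    rw [mgB]
    have hlen : (a :: b :: t).length = t.length + 2 := by simp
    have hmid : (a :: b :: t).length / 2 = (t.length + 2) / 2 := by rw [hlen]
    have hmid1 : 1 ≤ (a :: b :: t).length / 2 := by rw [hlen]; omega
    have hmidlt : (a :: b :: t).length / 2 < (a :: b :: t).length := by rw [hlen]; omega
    have htake_ne : (a :: b :: t).take ((a :: b :: t).length / 2) ≠ [] := by
      intro h
      have := congrArg List.length h
      simp [List.length_take] at this
    have hdrop_ne : (a :: b :: t).drop ((a :: b :: t).length / 2) ≠ [] := by
      intro h
      have := congrArg List.length h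
      simp [List.length_drop] at this
      omega
    rw [ih1 htake_ne, ih2 hdrop_ne]
    simp only
    have hsplit := adjGaps_append ((a :: b :: t).take ((a :: b :: t).length / 2))
      ((a :: b :: t).drop ((a :: b :: t).length / 2)) htake_ne hdrop_ne
    rw [List.take_append_drop] at hsplit
    have hhead : ((a :: b :: t).take ((a :: b :: t).length / 2)).headD 0 = (a :: b :: t).headD 0 := by
      cases h : (a :: b :: t).length / 2 with
      | zero => omega
      | succ m => simp
    have hlast : ((a :: b :: t).drop ((a :: b :: t).length / 2)).getLastD 0 = (a :: b :: t).getLastD 0 := by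
      rw [List.getLastD_eq_getLast?, List.getLastD_eq_getLast?, List.getLast?_drop]
      rw [if_neg (by omega)]
    rw [hsplit, omax_append]
    refine Prod.ext hhead (Prod.ext hlast rfl)

-- the two final maxima coincide
theorem final_max (G : List Int) (w : Int) :
    (G ++ [w]).foldl max 0 = maxWith (max 0 w) (omax G) := by
  cases G with
  | nil => simp [omax, maxWith]
  | cons x t =>
    have hL : ((x :: t) ++ [w]).foldl max 0 = max (max 0 (t.foldl max x)) w := by
      simp only [List.cons_append, List.foldl_cons, List.foldl_append, List.foldl_nil]
      rw [foldl_max_comm t 0 x]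
    rw [hL]
    simp only [omax, maxWith]
    rw [max_def, max_def, max_def]
    split_ifs <;> omega

-- ===== VERDICT (by name: the statement is the Claim_ definition above) =====
theorem solve_spec : Claim_equal_solve := by
  intro array dist _
  unfold Spec_solve solve solve_alt
  cases array with
  | nil => simp [PySem.List.enumerate]
  | cons a rest =>
    simp only
    rw [← List.foldl_map
        (f := fun ix : Int × Int =>
          (if ix.1 = ((a :: rest).length : Int) - 1
            then dist + PySem.List.pyGetD (a :: rest) 0 0
            else PySem.List.pyGetD (a :: rest) (ix.1 + 1) 0)
            - PySem.List.pyGetD (a :: rest) ix.1 0)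
        (g := fun (s : Int × Int) d => (s.1 + d, if d > s.2 then d else s.2)),
      map_dval_eq_gaps, zip_eq_adj, foldl_gaps]
    rw [mgB_spec (a :: rest) (by simp)]
    simp only [List.headD_cons]
    set L := (a :: rest).getLastD 0 with hL
    have hsum : (adjGaps (a :: rest) ++ [dist + a - L]).sum = dist := by
      rw [List.sum_append, adjGaps_sum, List.sum_cons, List.sum_nil, ← hL]
      ring
    rw [hsum]
    rw [final_max (adjGaps (a :: rest)) (dist + a - L)]
    cases omax (adjGaps (a :: rest)) with
    | none => simp [maxWith]
    | some g => simp [maxWith]
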